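-- pv_equiv track=rewrite | github.com/llanahp/IngenieriaInformaticaUAH | 2/Algoritmia y Complejidad/tema4/lopezLlana.Raul_PL4/Secuencia.py | crearTabla
-- ===== SOURCE A (Python) =====
-- def crearTabla(cadenaA, cadenaB):
--     '''Primero me debo crear la tabla dinámica'''
--     tabla = []
--     '''tantas filas como objetos'''
--     for i in range(len(cadenaA)):
--         aux = []
--         '''tantas columnas como el peso máximo que pueda esa alforja'''
--         for a in range(len(cadenaB)):
--             aux.append(0)
--         tabla.append(aux)
--     '''Teniendo ya la tabla creada y con todo a 0
--     Recorro de nuevo la tabla para rellenarla'''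
--
--     for fila in range(len(cadenaA)):
--         for columna in range(len(cadenaB)):
--             if (fila == 0):
--                 '''Si el caracter de la cadenaA se encuentra en alguna posicion de lo que llevo de cadenaB'''
--                 if (cadenaA[0] in cadenaB[0:(columna + 1)]):
--                     tabla[fila][columna] = 1
--                 else:
--                     tabla[fila][columna] = 0
--             elif (columna == 0):
--                 '''Si el caracter de la cadenaA se encuentra en alguna posicion de lo que llevo de cadenaB'''
--                 if (cadenaB[0] in cadenaA[0:(fila + 1)]):
--                     tabla[fila][columna] = 1
--                 else:
--                     tabla[fila][columna] = 0
--     return tabla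
-- ===== SOURCE B (Python) =====
-- def crearTabla(cadenaA, cadenaB):
--     n, m = len(cadenaA), len(cadenaB)
--     if n == 0 or m == 0:
--         return [[] for _ in range(n)]
--     # first index of cadenaA[0] in cadenaB (m if absent), and of cadenaB[0] in cadenaA (n if absent)
--     idxA = next((j for j in range(m) if cadenaB[j] == cadenaA[0]), m)
--     idxB = next((i for i in range(n) if cadenaA[i] == cadenaB[0]), n)
--     tabla = [[1 if j >= idxA else 0 for j in range(m)]]
--     for i in range(1, n):
--         tabla.append([1 if i >= idxB else 0] + [0] * (m - 1))
--     return tabla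
-- ===== Notes on version B (the rewrite author's own statement) =====
-- stated objective: alternative
-- what changed: Replaces the zero-table pass plus the quadratic fill with growing-prefix membership scans by two single first-occurrence scans (idxA, idxB) and a direct threshold fill of each row.
import Mathlib
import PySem

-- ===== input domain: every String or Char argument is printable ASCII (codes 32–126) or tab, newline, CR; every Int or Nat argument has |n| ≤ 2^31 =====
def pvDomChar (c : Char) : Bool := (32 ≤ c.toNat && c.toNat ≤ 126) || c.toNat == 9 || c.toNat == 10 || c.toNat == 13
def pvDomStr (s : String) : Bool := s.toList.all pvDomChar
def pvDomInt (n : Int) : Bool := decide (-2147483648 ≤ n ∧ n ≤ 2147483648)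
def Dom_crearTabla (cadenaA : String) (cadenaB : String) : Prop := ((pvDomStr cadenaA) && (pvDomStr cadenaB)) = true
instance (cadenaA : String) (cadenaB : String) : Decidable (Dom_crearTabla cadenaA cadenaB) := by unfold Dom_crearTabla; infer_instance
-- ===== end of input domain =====

-- B replaces A's quadratic fill with growing-prefix membership scans by two single
-- first-occurrence scans and a direct threshold fill of each row.

-- ===== PORT A =====
-- tabla[fila][columna] = v
def pvSetCell (t : List (List Int)) (i j : Nat) (v : Int) : List (List Int) :=
  t.modify i (fun row => row.set j v)

def crearTabla (cadenaA : String) (cadenaB : String) : List (List Int) :=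
  let a := cadenaA.toList
  let b := cadenaB.toList
  -- first pass: build the table of zeros by appending
  let tabla := (List.range a.length).foldl (fun t _ =>
    t ++ [(List.range b.length).foldl (fun aux _ => aux ++ [(0 : Int)]) []]) []
  -- second pass: fill row 0 / column 0.
  -- 'cadenaA[0] in cadenaB[0:(columna+1)]' is a substring test with a 1-character
  -- needle, hence exactly char membership in the sliced prefix (exact here).
  (List.range a.length).foldl (fun t fila =>
    (List.range b.length).foldl (fun t (columna : Nat) =>
      if fila = 0 then
        if a[0]! ∈ PySem.List.slice b (some 0) (some ((columna : Int) + 1)) then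
          pvSetCell t fila columna 1
        else
          pvSetCell t fila columna 0
      else if columna = 0 then
        if b[0]! ∈ PySem.List.slice a (some 0) (some ((fila : Int) + 1)) then
          pvSetCell t fila columna 1
        else
          pvSetCell t fila columna 0
      else t) t) tabla

-- ===== PORT B =====
def crearTabla_alt (cadenaA : String) (cadenaB : String) : List (List Int) :=
  let a := cadenaA.toList
  let b := cadenaB.toList
  let n := a.length
  let m := b.length
  if n = 0 ∨ m = 0 then (List.range n).map (fun _ => []) else
  -- next((j for j in range(m) if cadenaB[j] == cadenaA[0]), m): first index, m if absent
  let idxA := b.findIdx (· == a[0]!)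
  let idxB := a.findIdx (· == b[0]!)
  let tabla := [(List.range m).map (fun j => if idxA ≤ j then (1 : Int) else 0)]
  (List.range' 1 (n - 1)).foldl (fun t i =>
    t ++ [(if idxB ≤ i then (1 : Int) else 0) :: List.replicate (m - 1) 0]) tabla

-- ===== PRECONDITION & SPEC =====
def Spec_crearTabla (cadenaA : String) (cadenaB : String) (out : List (List Int)) : Prop := out = crearTabla_alt cadenaA cadenaB
instance (cadenaA : String) (cadenaB : String) (out : List (List Int)) : Decidable (Spec_crearTabla cadenaA cadenaB out) := by unfold Spec_crearTabla; infer_instance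

-- ===== CLAIM (what is proved, stated in full; the proofs are below) =====
def Claim_equal_crearTabla : Prop := ∀ (cadenaA : String) (cadenaB : String), Dom_crearTabla cadenaA cadenaB → Spec_crearTabla cadenaA cadenaB (crearTabla cadenaA cadenaB)

-- ===== LEMMAS AND PROOFS =====

-- append-loop = replicate / map
lemma pv_foldl_append_const {α β : Type} (l : List α) (r : β) (init : List β) :
    l.foldl (fun t _ => t ++ [r]) init = init ++ List.replicate l.length r := by
  induction l generalizing init with
  | nil => simp
  | cons x xs ih => simp [ih, List.replicate_succ]

lemma pv_foldl_append_map {α β : Type} (l : List α) (f : α → β) (init : List β) :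
    l.foldl (fun t x => t ++ [f x]) init = init ++ l.map f := by
  induction l generalizing init with
  | nil => simp
  | cons x xs ih => simp [ih]

-- modify / set past a prefix
lemma pv_set_append_len {α : Type} (l1 l2 : List α) (v : α) :
    (l1 ++ l2).set l1.length v = l1 ++ l2.set 0 v := by
  induction l1 with
  | nil => simp
  | cons x xs ih => simp [ih]

lemma pv_modify_append_len {α : Type} (l1 l2 : List α) (f : α → α) :
    (l1 ++ l2).modify l1.length f = l1 ++ l2.modify 0 f := by
  induction l1 with
  | nil => simp
  | cons x xs ih => simpa [List.modify] using ih

-- a column loop that only acts at columna = 0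
lemma pv_foldl_id_of_ne {α β : Type} (l : List β) (p : β → Prop) [DecidablePred p]
    (h : ∀ c ∈ l, ¬ p c) (g : α → α) (t : α) :
    l.foldl (fun t c => if p c then g t else t) t = t := by
  induction l generalizing t with
  | nil => rfl
  | cons x xs ih =>
    simp only [List.foldl_cons, if_neg (h x (by simp))]
    exact ih (fun c hc => h c (by simp [hc])) t

lemma pv_foldl_only_zero {α : Type} (m : Nat) (g : α → α) (t : α) :
    (List.range m).foldl (fun t c => if c = 0 then g t else t) t =
      if m = 0 then t else g t := by
  cases m with
  | zero => rfl
  | succ k =>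
    rw [List.range_succ_eq_map]
    simp only [List.foldl_cons, if_pos rfl, Nat.succ_ne_zero, if_neg]
    exact pv_foldl_id_of_ne _ _ (by simp) g (g t)

-- filling a replicate-row position by position yields a map over range
lemma pv_fill_row (m : Nat) (f : Nat → Int) (z : Int) :
    (List.range m).foldl (fun row c => row.set c (f c)) (List.replicate m z) =
      (List.range m).map f := by
  suffices h : ∀ k rest, (List.range k).foldl (fun row c => row.set c (f c))
      (List.replicate k z ++ rest) = (List.range k).map f ++ rest by
    have := h m []
    simpa using this
  intro k
  induction k with
  | zero => intro rest; simp
  | succ j ih =>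
    intro rest
    rw [List.range_succ, List.foldl_append]
    have hrep : List.replicate (j + 1) z ++ rest = List.replicate j z ++ (z :: rest) := by
      simp [List.replicate_succ']
    rw [hrep, ih (z :: rest)]
    simp only [List.foldl_cons, List.foldl_nil]
    have hlen : ((List.range j).map f).length = j := by simp
    calc ((List.range j).map f ++ z :: rest).set j (f j)
        = ((List.range j).map f ++ z :: rest).set ((List.range j).map f).length (f j) := by
          rw [hlen]
      _ = (List.range j).map f ++ (z :: rest).set 0 (f j) := pv_set_append_len _ _ _
      _ = (List.range j ++ [j]).map f ++ rest := by rw [List.map_append, List.append_assoc]; rfl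

-- the outer row loop on a replicate table acts row by row
lemma pv_outer_fold (n : Nat) (r : List Int) (G : Nat → List Int → List Int) :
    (List.range n).foldl (fun t i => t.modify i (G i)) (List.replicate n r) =
      (List.range n).map (fun i => G i r) := by
  suffices h : ∀ k rest, (List.range k).foldl (fun t i => t.modify i (G i))
      (List.replicate k r ++ rest) = (List.range k).map (fun i => G i r) ++ rest by
    have := h n []
    simpa using this
  intro k
  induction k with
  | zero => intro rest; simp
  | succ j ih =>
    intro rest
    rw [List.range_succ, List.foldl_append]
    have hrep : List.replicate (j + 1) r ++ rest = List.replicate j r ++ (r :: rest) := by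
      simp [List.replicate_succ']
    rw [hrep, ih (r :: rest)]
    simp only [List.foldl_cons, List.foldl_nil]
    have hlen : ((List.range j).map (fun i => G i r)).length = j := by simp
    calc ((List.range j).map (fun i => G i r) ++ r :: rest).modify j (G j)
        = ((List.range j).map (fun i => G i r) ++ r :: rest).modify
            ((List.range j).map (fun i => G i r)).length (G j) := by rw [hlen]
      _ = (List.range j).map (fun i => G i r) ++ (r :: rest).modify 0 (G j) :=
          pv_modify_append_len _ _ _
      _ = (List.range j ++ [j]).map (fun i => G i r) ++ rest := by
          rw [List.map_append, List.append_assoc]; rfl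

-- first occurrence vs membership in a prefix
lemma pv_mem_take_iff_findIdx (l : List Char) (x : Char) (c : Nat) (hc : c < l.length) :
    x ∈ l.take (c + 1) ↔ l.findIdx (· == x) ≤ c := by
  induction l generalizing c with
  | nil => simp at hc
  | cons h t ih =>
    rw [List.findIdx_cons]
    by_cases hx : h = x
    · simp [hx]
    · have hbx : (h == x) = false := by simp [hx]
      rw [hbx]
      simp only [cond_false, List.take_succ_cons, List.mem_cons]
      cases c with
      | zero => simp [Ne.symm hx]
      | succ c' =>
        have hc' : c' < t.length := by simpa using hc
        rw [ih c' hc']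
        constructor
        · rintro (h1 | h2)
          · exact absurd h1.symm hx
          · omega
        · intro h1; right; omega


lemma pv_fold_modify_row (l : List Nat) (i : Nat) (f : Nat → Int) (t : List (List Int)) :
    l.foldl (fun t c => t.modify i (fun row => row.set c (f c))) t =
      t.modify i (fun row => l.foldl (fun row c => row.set c (f c)) row) := by
  induction l generalizing t with
  | nil =>
    simp only [List.foldl_nil]
    rw [show (fun (row : List Int) => row) = @id (List Int) from rfl, List.modify_id]
  | cons c cs ih => simp [ih, List.modify_modify_eq, Function.comp_def]

-- A's whole fill pass, on the zero table, row by row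
lemma pv_fill_pass (n m : Nat) (hm : m ≠ 0) (P Q : Nat → Prop)
    [DecidablePred P] [DecidablePred Q] :
    (List.range n).foldl (fun t fila =>
      (List.range m).foldl (fun t (c : Nat) =>
        if fila = 0 then
          (if P c then pvSetCell t fila c 1 else pvSetCell t fila c 0)
        else if c = 0 then
          (if Q fila then pvSetCell t fila c 1 else pvSetCell t fila c 0)
        else t) t) (List.replicate n (List.replicate m 0)) =
    (List.range n).map (fun i =>
      if i = 0 then (List.range m).map (fun c => if P c then (1 : Int) else 0)
      else (if Q i then (1 : Int) else 0) :: List.replicate (m - 1) 0) := by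
  have hbody : (fun (t : List (List Int)) (fila : Nat) =>
      (List.range m).foldl (fun t (c : Nat) =>
        if fila = 0 then
          (if P c then pvSetCell t fila c 1 else pvSetCell t fila c 0)
        else if c = 0 then
          (if Q fila then pvSetCell t fila c 1 else pvSetCell t fila c 0)
        else t) t) =
      (fun t fila => t.modify fila (fun row =>
        if fila = 0 then
          (List.range m).foldl (fun row c => row.set c (if P c then (1 : Int) else 0)) row
        else row.set 0 (if Q fila then (1 : Int) else 0))) := by
    funext t fila
    cases fila with
    | zero =>
      simp only [eq_self_iff_true, if_true]
      have h1 : (fun (t : List (List Int)) (c : Nat) =>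
          if P c then pvSetCell t 0 c 1 else pvSetCell t 0 c 0) =
          (fun t c => t.modify 0 (fun row => row.set c (if P c then (1 : Int) else 0))) := by
        funext t c
        by_cases h : P c <;> simp [pvSetCell, h]
      rw [h1, pv_fold_modify_row]
    | succ s =>
      simp only [Nat.succ_ne_zero, if_neg, reduceCtorEq, if_false]
      have h1 : (fun (t : List (List Int)) (c : Nat) =>
          if c = 0 then
            (if Q (s + 1) then pvSetCell t (s + 1) c 1 else pvSetCell t (s + 1) c 0)
          else t) =
          (fun t c => if c = 0 then
            t.modify (s + 1) (fun row => row.set 0 (if Q (s + 1) then (1 : Int) else 0))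
          else t) := by
        funext t c
        by_cases hc : c = 0
        · subst hc; by_cases h : Q (s + 1) <;> simp [pvSetCell, h]
        · simp [hc]
      rw [h1, pv_foldl_only_zero m _ t, if_neg hm]
  rw [hbody, pv_outer_fold]
  apply List.map_congr_left
  intro i hi
  cases i with
  | zero => simp [pv_fill_row]
  | succ s =>
    simp only [Nat.succ_ne_zero, reduceCtorEq, if_false]
    obtain ⟨k, hk⟩ : ∃ k, m = k + 1 := ⟨m - 1, by omega⟩
    subst hk
    simp [List.replicate_succ]

lemma pv_foldl_skip {α β : Type} (l : List α) (t : β) :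
    l.foldl (fun t _ => t) t = t := by
  induction l generalizing t with
  | nil => rfl
  | cons x xs ih => simpa using ih t

-- ===== VERDICT (by name: the statement is the Claim_ definition above) =====
theorem crearTabla_spec : Claim_equal_crearTabla := by
  intro A B _
  show crearTabla A B = crearTabla_alt A B
  simp only [crearTabla, crearTabla_alt]
  rw [pv_foldl_append_const, pv_foldl_append_const]
  simp only [List.length_range, List.nil_append]
  set a := A.toList with ha
  set b := B.toList with hb
  by_cases hn : a.length = 0
  · simp [hn]
  by_cases hm : b.length = 0
  · rw [if_pos (Or.inr hm)]
    simp only [hm, List.range_zero, List.foldl_nil, pv_foldl_skip]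
    simp
  · rw [if_neg (by simp [hn, hm])]
    rw [pv_fill_pass a.length b.length hm
      (fun c => a[0]! ∈ PySem.List.slice b (some 0) (some ((c : Int) + 1)))
      (fun i => b[0]! ∈ PySem.List.slice a (some 0) (some ((i : Int) + 1)))]
    rw [pv_foldl_append_map]
    obtain ⟨k, hk⟩ : ∃ k, a.length = k + 1 := ⟨a.length - 1, by omega⟩
    rw [hk]
    simp only [Nat.add_sub_cancel]
    have hr : List.range (k + 1) = 0 :: List.range' 1 k := by
      rw [List.range_eq_range', List.range'_succ]
    rw [hr, List.map_cons, if_pos rfl, List.singleton_append]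
    congr 1
    · apply List.map_congr_left
      intro c hc
      have hc' : c < b.length := List.mem_range.mp hc
      have hcast : ((c : Int) + 1) = ((c + 1 : Nat) : Int) := by push_cast; ring
      rw [hcast, PySem.List.slice_zero_start, PySem.List.slice_to_natCast]
      exact if_congr (pv_mem_take_iff_findIdx b (a[0]!) c hc') rfl rfl
    · apply List.map_congr_left
      intro i hi
      have hi' : 1 ≤ i ∧ i < 1 + k := by obtain ⟨j, hj, hij⟩ := List.mem_range'.mp hi; omega
      rw [if_neg (by omega)]
      congr 1
      have hi'' : i < a.length := by omega
      have hcast : ((i : Int) + 1) = ((i + 1 : Nat) : Int) := by push_cast; ring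
      rw [hcast, PySem.List.slice_zero_start, PySem.List.slice_to_natCast]
      exact if_congr (pv_mem_take_iff_findIdx a (b[0]!) i hi'') rfl rfl
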